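-- pv_equiv track=rewrite | github.com/varnitrastogi238/algo99 | STARTUP-main/shop/analysis/analysis_fun.py | total_tr
-- ===== SOURCE A (Python) =====
-- def total_tr(positions):
--     lists=[]
--     for j in range(1,5):
--         trades=0
--         for i in range(len(positions)):
--             if positions[i][-1]==j:
--                 trades+=1
--         lists.append(trades)
--
--     return lists
-- ===== SOURCE B (Python) =====
-- def total_tr(positions):
--     counts = {}
--     for p in positions:
--         k = p[-1]
--         counts[k] = counts.get(k, 0) + 1
--     return [counts.get(j, 0) for j in range(1, 5)]
-- ===== Notes on version B (the rewrite author's own statement) =====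
-- stated objective: alternative
-- what changed: Replaces four separate index-loop scans over positions (one per target value 1..4) with a single pass that builds a frequency dict of last elements, then reads off the four counts in order.
import Mathlib
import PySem

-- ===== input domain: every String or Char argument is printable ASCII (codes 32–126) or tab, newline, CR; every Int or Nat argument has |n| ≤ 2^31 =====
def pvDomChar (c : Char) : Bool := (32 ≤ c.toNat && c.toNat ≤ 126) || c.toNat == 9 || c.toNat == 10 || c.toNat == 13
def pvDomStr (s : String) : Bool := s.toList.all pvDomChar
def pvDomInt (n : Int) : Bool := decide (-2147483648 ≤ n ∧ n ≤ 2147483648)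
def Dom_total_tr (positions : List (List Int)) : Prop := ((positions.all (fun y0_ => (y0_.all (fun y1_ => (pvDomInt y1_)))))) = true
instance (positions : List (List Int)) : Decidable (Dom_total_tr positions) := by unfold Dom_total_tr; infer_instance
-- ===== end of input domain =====

-- B replaces A's four scans of positions (one per value 1..4) with one pass building a
-- frequency dict of last elements, then reads the four counts off the dict.


-- ===== PORT A =====
def total_tr (positions : List (List Int)) : List Int :=
  (PySem.List.pyRange 1 5 1).foldl (fun lists j =>
    let trades : Int :=
      (PySem.List.pyRange 0 (positions.length : Int) 1).foldl
        (fun trades i =>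
          if PySem.List.pyGetD (PySem.List.pyGetD positions i []) (-1) 0 = j
          then trades + 1 else trades) 0
    lists ++ [trades]) []

-- ===== PORT B =====
def total_tr_alt (positions : List (List Int)) : List Int :=
  let counts : PySem.Dict Int Int :=
    positions.foldl (fun d p =>
      let k := PySem.List.pyGetD p (-1) 0
      d.insert k (d.getD k 0 + 1)) PySem.Dict.empty
  (PySem.List.pyRange 1 5 1).map (fun j => counts.getD j 0)

-- ===== PRECONDITION & SPEC =====
-- Pre_ excludes inputs containing an empty inner list: there positions[i][-1] raises IndexError in A (and in B).
def Pre_total_tr (positions : List (List Int)) : Prop := ∀ p ∈ positions, p ≠ []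
instance (positions : List (List Int)) : Decidable (Pre_total_tr positions) := by unfold Pre_total_tr; infer_instance
def pvWitness_total_tr : List (List Int) := [[1], [2, 3], [0, 4]]
def Spec_total_tr (positions : List (List Int)) (out : List Int) : Prop := out = total_tr_alt positions
instance (positions : List (List Int)) (out : List Int) : Decidable (Spec_total_tr positions out) := by unfold Spec_total_tr; infer_instance

-- ===== CLAIM (what is proved, stated in full; the proofs are below) =====
def Claim_equal_total_tr : Prop := ∀ (positions : List (List Int)), Dom_total_tr positions → Pre_total_tr positions → Spec_total_tr positions (total_tr positions)

-- ===== LEMMAS AND PROOFS =====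

-- A's inner index loop over range(len(positions)), counting last elements equal to j,
-- equals B's dict lookup at j (dict built by the counting fold), for any starting dict/accumulator.
theorem total_tr_count_dict (j : Int) : ∀ (l : List (List Int)) (d : PySem.Dict Int Int) (t : Int),
    List.foldl (fun trades p => if PySem.List.pyGetD p (-1) 0 = j then trades + 1 else trades) t l
    = t + ((List.foldl (fun d p => d.insert (PySem.List.pyGetD p (-1) 0) (d.getD (PySem.List.pyGetD p (-1) 0) 0 + 1)) d l).getD j 0
           - d.getD j 0) := by
  intro l
  induction l with
  | nil => intro d t; simp
  | cons p l ih =>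
    intro d t
    simp only [List.foldl]
    rw [ih (d.insert (PySem.List.pyGetD p (-1) 0) (d.getD (PySem.List.pyGetD p (-1) 0) 0 + 1))]
    by_cases h : PySem.List.pyGetD p (-1) 0 = j
    · simp [h, PySem.Dict.getD_insert_self]; ring
    · simp only [if_neg h]
      rw [PySem.Dict.getD_insert_of_ne _ _ _ (fun e => h (Eq.symm e))]

theorem total_tr_inner_count (positions : List (List Int)) (j : Int) :
    (PySem.List.pyRange 0 (positions.length : Int) 1).foldl
      (fun trades i =>
        if PySem.List.pyGetD (PySem.List.pyGetD positions i []) (-1) 0 = j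
        then trades + 1 else trades) (0 : Int)
    = (positions.foldl (fun d p =>
        d.insert (PySem.List.pyGetD p (-1) 0) (d.getD (PySem.List.pyGetD p (-1) 0) 0 + 1)) PySem.Dict.empty).getD j 0 := by
  rw [PySem.List.foldl_pyRange_zero_pyGetD' positions []
        (fun trades p => if PySem.List.pyGetD p (-1) 0 = j then trades + 1 else trades) 0]
  rw [total_tr_count_dict j positions PySem.Dict.empty 0]
  simp [PySem.Dict.empty, PySem.Dict.getD, PySem.Dict.get?]

-- ===== VERDICT (by name: the statement is the Claim_ definition above) =====
theorem total_tr_spec : Claim_equal_total_tr := by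
  intro positions _ _
  unfold Spec_total_tr total_tr total_tr_alt
  have h4 : PySem.List.pyRange 1 5 1 = [1, 2, 3, 4] := by decide
  rw [h4]
  simp only [List.foldl, List.map, total_tr_inner_count]
  simp
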